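-- pv_equiv track=rewrite | github.com/oizgagin/adventofcode2024 | 24/1.py | solution
-- ===== SOURCE A (Python) =====
-- def solution(gates, wires):
--     calculated = gates
--
--     ops = {
--         "OR": lambda x, y: x | y,
--         "AND": lambda x, y: x & y,
--         "XOR": lambda x, y: x ^ y,
--     }
--
--     zs = set(key for key in wires.keys() if key.startswith("z"))
--
--     while not all(zkey in calculated for zkey in zs):
--         for gate3, (gate1, gate2, op) in wires.items():
--             if gate3 not in calculated:
--                 if gate1 in calculated and gate2 in calculated:
--                     calculated[gate3] = ops[op](calculated[gate1], calculated[gate2])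
--
--     res = 0
--     for zkey in sorted(zs, reverse=True):
--         res = (res << 1) | calculated[zkey]
--     return res
-- ===== SOURCE B (Python) =====
-- def solution(gates, wires):
--     # Memoized DFS: each wire is evaluated once, on demand, instead of A's
--     # repeated whole-circuit sweeps.  (Does not mutate the caller's gates dict.)
--     memo = dict(gates)
--
--     def ev(w):
--         if w in memo:
--             return memo[w]
--         g1, g2, op = wires[w]
--         x = ev(g1)
--         y = ev(g2)
--         v = x | y if op == "OR" else (x & y if op == "AND" else x ^ y)
--         memo[w] = v
--         return v
--
--     res = 0
--     for z in sorted((k for k in wires if k.startswith("z")), reverse=True):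
--         res = (res << 1) | ev(z)
--     return res
-- ===== Notes on version B (the rewrite author's own statement) =====
-- stated objective: alternative
-- what changed: Replaces A's repeated whole-dict sweeps until all z-wires are computed (a fixpoint iteration) with a memoized depth-first evaluation that computes each wire once on demand; same cost on shallow circuits, fewer passes on deep ones.
-- outside the precondition, e.g. on solution({'a': 1}, {'z00': ['a', 'a', 'OR'], 'b': ['q', 'q', 'NAND']}): A returns 1, B returns 1
import Mathlib
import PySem

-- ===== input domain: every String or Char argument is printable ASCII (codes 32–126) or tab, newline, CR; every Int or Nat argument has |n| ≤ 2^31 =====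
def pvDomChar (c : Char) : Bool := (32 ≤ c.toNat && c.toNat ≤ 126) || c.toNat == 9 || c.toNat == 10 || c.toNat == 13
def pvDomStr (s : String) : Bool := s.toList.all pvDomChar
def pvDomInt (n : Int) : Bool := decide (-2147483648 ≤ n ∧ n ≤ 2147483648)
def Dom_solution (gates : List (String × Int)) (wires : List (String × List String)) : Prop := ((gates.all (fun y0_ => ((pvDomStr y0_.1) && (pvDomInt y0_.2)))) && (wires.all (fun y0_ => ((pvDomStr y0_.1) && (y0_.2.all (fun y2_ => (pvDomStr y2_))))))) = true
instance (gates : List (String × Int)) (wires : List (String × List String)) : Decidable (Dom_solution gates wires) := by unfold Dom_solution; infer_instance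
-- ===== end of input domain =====

-- B replaces A's repeated whole-dict sweeps (fixpoint iteration) with a memoized
-- depth-first evaluation computing each wire once (alternative algorithm, similar cost);
-- equivalence of RETURN values only (A mutates its gates argument in place, B does not).


-- ===== PORT A =====

-- ops[op](x, y); none = KeyError on an op outside {"OR","AND","XOR"} (excluded by Pre_)
def pvOpsA (op : String) (x y : Int) : Option Int :=
  if op = "OR" then some (PySem.Int.bor x y)
  else if op = "AND" then some (PySem.Int.band x y)
  else if op = "XOR" then some (PySem.Int.bxor x y)
  else none

-- the body of "for gate3, (gate1, gate2, op) in wires.items(): …" for one item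
def pvStepA (c : PySem.Dict String Int) (it : String × List String) : PySem.Dict String Int :=
  match it.2 with
  | [g1, g2, op] =>
      if c.contains it.1 then c
      else if c.contains g1 && c.contains g2 then
        match pvOpsA op (c.getD g1 0) (c.getD g2 0) with
        | some v => c.insert it.1 v
        | none => c            -- KeyError (excluded by Pre_)
      else c
  | _ => c                     -- ValueError on unpacking (excluded by Pre_)

-- one full pass of the for loop over wires.items()
def pvSweepA (wd : PySem.Dict String (List String)) (c : PySem.Dict String Int) :
    PySem.Dict String Int :=
  wd.items.foldl pvStepA c

-- the while loop; fuel makes it total: on inputs where Python's loop terminates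
-- (all of Pre_) wires.length + 1 sweeps are enough, so the fuel branch never fires there
def pvLoopA (wd : PySem.Dict String (List String)) (zs : PySem.Set String) :
    Nat → PySem.Dict String Int → PySem.Dict String Int
  | fuel, c =>
    if zs.all (fun z => c.contains z) then c
    else
      match fuel with
      | 0 => c
      | f + 1 => pvLoopA wd zs f (pvSweepA wd c)

def solution (gates : List (String × Int)) (wires : List (String × List String)) : Int :=
  let calculated := PySem.Dict.ofList gates
  let wd := PySem.Dict.ofList wires
  let zs : PySem.Set String :=
    PySem.Set.ofList (wd.keys.filter (fun k => PySem.Str.startswith k "z"))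
  let c := pvLoopA wd zs (wires.length + 1) calculated
  -- res = (res << 1) | calculated[zkey]; getD 0: KeyError impossible once the loop exited
  (PySem.List.sorted zs (fun x => x) true).foldl
    (fun r z => PySem.Int.bor (r <<< (1 : Nat)) (c.getD z 0)) 0

-- ===== PORT B =====

-- x | y if op == "OR" else (x & y if op == "AND" else x ^ y)
def pvApplyB (op : String) (x y : Int) : Int :=
  if op = "OR" then PySem.Int.bor x y
  else if op = "AND" then PySem.Int.band x y
  else PySem.Int.bxor x y

-- ev(w) with the memo threaded; none = KeyError wires[w] / unpacking ValueError /
-- fuel exhausted (Python recursion; under Pre_ wires.length + 1 frames always suffice)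
def pvEvB (wd : PySem.Dict String (List String)) :
    Nat → PySem.Dict String Int → String → Option (Int × PySem.Dict String Int)
  | 0, _, _ => none
  | f + 1, m, w =>
    match m.get? w with
    | some v => some (v, m)
    | none =>
      match wd.get? w with
      | some [g1, g2, op] =>
        match pvEvB wd f m g1 with
        | none => none
        | some (x, m1) =>
          match pvEvB wd f m1 g2 with
          | none => none
          | some (y, m2) =>
            let v := pvApplyB op x y
            some (v, m2.insert w v)
      | _ => none

def solution_alt (gates : List (String × Int)) (wires : List (String × List String)) : Int :=
  let wd := PySem.Dict.ofList wires
  let memo := PySem.Dict.ofList gates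
  ((PySem.List.sorted (wd.keys.filter (fun k => PySem.Str.startswith k "z"))
      (fun x => x) true).foldl
    (fun (p : Int × PySem.Dict String Int) z =>
      match pvEvB wd (wires.length + 1) p.2 z with
      | some (v, m') => (PySem.Int.bor (p.1 <<< (1 : Nat)) v, m')
      | none => p)             -- unreachable under Pre_
    (0, memo)).1

-- ===== PRECONDITION & SPEC =====

-- one step of graph reachability: wires whose two inputs are already known become known
def pvStepR (s : List String) (p : String × List String) : List String :=
  match p.2 with
  | [g1, g2, _] => if g1 ∈ s ∧ g2 ∈ s ∧ p.1 ∉ s then s ++ [p.1] else s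
  | _ => s

def pvStep (wd : PySem.Dict String (List String)) (s : List String) : List String :=
  wd.items.foldl pvStepR s

def pvReach (wd : PySem.Dict String (List String)) (s : List String) : Nat → List String
  | 0 => s
  | n + 1 => pvStep wd (pvReach wd s n)

-- Pre_ admits inputs where A's while loop is never entered (every z-wire of wires
-- already among the gates — first disjunct), and otherwise requires (a) every wires
-- entry to be (g1, g2, op) with op in {OR, AND, XOR} — a violating entry raises
-- ValueError/KeyError in A whenever it is reached, and whether it is reached depends on
-- the run, so such inputs are excluded even when A returns because the bad entry is
-- never executed (see cites) — and (b) every z-wire to be derivable from the gates,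
-- without which A's while loop never terminates (cycle / missing input).
-- pvReach/pvStepR is plain graph reachability, not either port's algorithm.
def Pre_solution (gates : List (String × Int)) (wires : List (String × List String)) : Prop :=
  (∀ z ∈ (PySem.Dict.ofList wires).keys.filter (fun k => PySem.Str.startswith k "z"),
      z ∈ (PySem.Dict.ofList gates).keys) ∨
  ((∀ p ∈ (PySem.Dict.ofList wires).items,
      p.2.length = 3 ∧ (p.2.getD 2 "" = "OR" ∨ p.2.getD 2 "" = "AND" ∨ p.2.getD 2 "" = "XOR")) ∧
   (∀ z ∈ (PySem.Dict.ofList wires).keys.filter (fun k => PySem.Str.startswith k "z"),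
      z ∈ pvReach (PySem.Dict.ofList wires) (PySem.Dict.ofList gates).keys wires.length))

instance (gates : List (String × Int)) (wires : List (String × List String)) :
    Decidable (Pre_solution gates wires) := by unfold Pre_solution; infer_instance

def pvWitness_solution : (List (String × Int)) × (List (String × List String)) :=
  ([("x00", 1), ("y00", 1)], [("z00", ["x00", "y00", "AND"])])

def Spec_solution (gates : List (String × Int)) (wires : List (String × List String)) (out : Int) : Prop := out = solution_alt gates wires
instance (gates : List (String × Int)) (wires : List (String × List String)) (out : Int) : Decidable (Spec_solution gates wires out) := by unfold Spec_solution; infer_instance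

-- ===== CLAIM (what is proved, stated in full; the proofs are below) =====
def Claim_equal_solution : Prop := ∀ (gates : List (String × Int)) (wires : List (String × List String)), Dom_solution gates wires → Pre_solution gates wires → Spec_solution gates wires (solution gates wires)

-- ===== LEMMAS AND PROOFS =====

-- the unique value of a wire: a gate input, or the gate applied to its wires' values
inductive pvEvals (gd : PySem.Dict String Int) (wd : PySem.Dict String (List String)) :
    String → Int → Prop
  | base (w : String) (v : Int) : gd.get? w = some v → pvEvals gd wd w v
  | gate (w g1 g2 op : String) (x y : Int) :
      gd.contains w = false → wd.get? w = some [g1, g2, op] →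
      pvEvals gd wd g1 x → pvEvals gd wd g2 y → pvEvals gd wd w (pvApplyB op x y)

theorem pvEvals_det (gd : PySem.Dict String Int) (wd : PySem.Dict String (List String))
    (w : String) (x y : Int) (hx : pvEvals gd wd w x) (hy : pvEvals gd wd w y) : x = y := by
  induction hx generalizing y with
  | base w v hv =>
    cases hy with
    | base _ v' hv' => rw [hv] at hv'; exact Option.some.inj hv'
    | gate _ g1 g2 op a b hnc hw _ _ =>
      rw [PySem.Dict.contains_eq_isSome_get?, hv] at hnc; simp at hnc
  | gate w g1 g2 op a b hnc hw ha hb iha ihb =>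
    cases hy with
    | base _ v' hv' =>
      rw [PySem.Dict.contains_eq_isSome_get?, hv'] at hnc; simp at hnc
    | gate _ g1' g2' op' a' b' hnc' hw' ha' hb' =>
      rw [hw] at hw'
      injection hw' with h
      injection h with h1 h
      injection h with h2 h
      injection h with h3 _
      subst h1; subst h2; subst h3
      rw [iha a' ha', ihb b' hb']

-- the invariant both programs maintain on their wire→value map
def pvInv (gd : PySem.Dict String Int) (wd : PySem.Dict String (List String))
    (m : PySem.Dict String Int) : Prop :=
  (∀ k, gd.contains k = true → m.contains k = true) ∧
  (∀ k v, m.get? k = some v → pvEvals gd wd k v)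

theorem pvInv_init (gd : PySem.Dict String Int) (wd : PySem.Dict String (List String)) :
    pvInv gd wd gd :=
  ⟨fun _ h => h, fun k v h => pvEvals.base k v h⟩

theorem pvContains_getD (c : PySem.Dict String Int) (k : String)
    (h : c.contains k = true) : c.get? k = some (c.getD k 0) := by
  rw [PySem.Dict.contains_eq_isSome_get?] at h
  rw [PySem.Dict.getD_eq_get?_getD]
  cases hg : c.get? k with
  | none => rw [hg] at h; simp at h
  | some u => simp

theorem pvInv_insert (gd : PySem.Dict String Int) (wd : PySem.Dict String (List String))
    (m : PySem.Dict String Int) (w : String) (v : Int)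
    (h : pvInv gd wd m) (hev : pvEvals gd wd w v) :
    pvInv gd wd (m.insert w v) := by
  constructor
  · intro k hk
    rw [PySem.Dict.contains_insert]
    simp [h.1 k hk]
  · intro k u hk
    rw [PySem.Dict.get?_insert] at hk
    by_cases hkw : k = w
    · subst hkw; simp at hk; subst hk; exact hev
    · simp [hkw] at hk; exact h.2 k u hk

-- valid pvOpsA agrees with pvApplyB
theorem pvOpsA_eq_applyB (op : String) (x y v : Int) (h : pvOpsA op x y = some v) :
    v = pvApplyB op x y := by
  unfold pvOpsA at h
  unfold pvApplyB
  split_ifs at h <;> split_ifs <;> simp_all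

-- ---- A side: every computed entry has the circuit value ----

theorem pvStepA_inv (gd : PySem.Dict String Int) (wd : PySem.Dict String (List String))
    (c : PySem.Dict String Int) (it : String × List String)
    (hit : wd.get? it.1 = some it.2) (h : pvInv gd wd c) :
    pvInv gd wd (pvStepA c it) := by
  unfold pvStepA
  match hs : it.2 with
  | [] => exact h
  | [a] => exact h
  | [a, b] => exact h
  | a :: b :: cc :: d :: t => exact h
  | [g1, g2, op] =>
    cases h1 : c.contains it.1 with
    | true => simpa using h
    | false =>
      simp only [h1, Bool.false_eq_true, if_false]
      cases h2 : c.contains g1 && c.contains g2 with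
      | false => simpa using h
      | true =>
        simp only [if_true]
        match ho : pvOpsA op (c.getD g1 0) (c.getD g2 0) with
        | none => exact h
        | some v =>
          simp only [Bool.and_eq_true] at h2
          have e1 := h.2 g1 _ (pvContains_getD c g1 h2.1)
          have e2 := h.2 g2 _ (pvContains_getD c g2 h2.2)
          have hgd : gd.contains it.1 = false := by
            cases hgd : gd.contains it.1
            · rfl
            · rw [h.1 it.1 hgd] at h1; exact absurd h1 (by simp)
          have hev : pvEvals gd wd it.1 v := by
            rw [pvOpsA_eq_applyB op _ _ v ho]
            rw [hs] at hit
            exact pvEvals.gate it.1 g1 g2 op _ _ hgd hit e1 e2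
          exact pvInv_insert gd wd c it.1 v h hev

theorem pvSweepA_inv (gd : PySem.Dict String Int) (wd : PySem.Dict String (List String))
    (c : PySem.Dict String Int) (hnd : wd.keys.Nodup) (h : pvInv gd wd c) :
    pvInv gd wd (pvSweepA wd c) := by
  unfold pvSweepA
  have : ∀ (l : List (String × List String)) (c : PySem.Dict String Int), (∀ p ∈ l, wd.get? p.1 = some p.2) → pvInv gd wd c →
      pvInv gd wd (l.foldl pvStepA c) := by
    intro l
    induction l with
    | nil => intro c _ h; exact h
    | cons p t ih =>
      intro c hl h
      exact ih _ (fun q hq => hl q (List.mem_cons_of_mem _ hq))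
        (pvStepA_inv gd wd c p (hl p (List.mem_cons_self ..)) h)
  exact this wd.items c
    (fun p hp => PySem.Dict.get?_of_mem_items wd (by cases p; exact hp) hnd) h

theorem pvLoopA_inv (gd : PySem.Dict String Int) (wd : PySem.Dict String (List String))
    (zs : PySem.Set String) (hnd : wd.keys.Nodup) (fuel : Nat) (c : PySem.Dict String Int)
    (h : pvInv gd wd c) : pvInv gd wd (pvLoopA wd zs fuel c) := by
  induction fuel generalizing c with
  | zero => rw [pvLoopA]; split_ifs <;> exact h
  | succ f ih =>
    rw [pvLoopA]
    split_ifs with hz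
    · exact h
    · exact ih _ (pvSweepA_inv gd wd c hnd h)

-- ---- A side: everything reachable appears among the computed keys ----

def pvWfIt (p : String × List String) : Prop :=
  p.2.length = 3 ∧ (p.2.getD 2 "" = "OR" ∨ p.2.getD 2 "" = "AND" ∨ p.2.getD 2 "" = "XOR")

theorem pvStepA_mono (c : PySem.Dict String Int) (it : String × List String) (k : String)
    (h : c.contains k = true) : (pvStepA c it).contains k = true := by
  unfold pvStepA
  match it.2 with
  | [] => exact h
  | [a] => exact h
  | [a, b] => exact h
  | a :: b :: cc :: d :: t => exact h
  | [g1, g2, op] =>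
    cases h1 : c.contains it.1 with
    | true => simpa using h
    | false =>
      simp only [h1, Bool.false_eq_true, if_false]
      cases h2 : c.contains g1 && c.contains g2 with
      | false => simpa using h
      | true =>
        simp only [if_true]
        match pvOpsA op (c.getD g1 0) (c.getD g2 0) with
        | none => exact h
        | some v => rw [PySem.Dict.contains_insert]; simp [h]

theorem pvStepR_cases (s : List String) (it : String × List String) (x : String)
    (hx : x ∈ pvStepR s it) :
    x ∈ s ∨ (x = it.1 ∧ ∃ g1 g2 op, it.2 = [g1, g2, op] ∧ g1 ∈ s ∧ g2 ∈ s) := by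
  unfold pvStepR at hx
  match hit : it.2 with
  | [] => rw [hit] at hx; exact Or.inl hx
  | [a] => rw [hit] at hx; exact Or.inl hx
  | [a, b] => rw [hit] at hx; exact Or.inl hx
  | a :: b :: cc :: d :: t => rw [hit] at hx; exact Or.inl hx
  | [g1, g2, op] =>
    rw [hit] at hx
    simp only at hx
    by_cases hc : g1 ∈ s ∧ g2 ∈ s ∧ it.1 ∉ s
    · rw [if_pos hc] at hx
      rcases List.mem_append.1 hx with hxs | hx1
      · exact Or.inl hxs
      · simp at hx1; exact Or.inr ⟨hx1, g1, g2, op, rfl, hc.1, hc.2.1⟩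
    · rw [if_neg hc] at hx; exact Or.inl hx

theorem pvStepA_fires (c : PySem.Dict String Int) (it : String × List String)
    (g1 g2 op : String) (hit : it.2 = [g1, g2, op])
    (hop : op = "OR" ∨ op = "AND" ∨ op = "XOR")
    (h1 : c.contains g1 = true) (h2 : c.contains g2 = true) :
    (pvStepA c it).contains it.1 = true := by
  obtain ⟨v, hv⟩ : ∃ v, pvOpsA op (c.getD g1 0) (c.getD g2 0) = some v := by
    rcases hop with h | h | h <;> subst h
    · exact ⟨PySem.Int.bor (c.getD g1 0) (c.getD g2 0), by simp [pvOpsA]⟩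
    · exact ⟨PySem.Int.band (c.getD g1 0) (c.getD g2 0), by simp [pvOpsA]⟩
    · exact ⟨PySem.Int.bxor (c.getD g1 0) (c.getD g2 0), by simp [pvOpsA]⟩
  cases hci : c.contains it.1 with
  | true => simp [pvStepA, hit, hci]
  | false => simp [pvStepA, hit, hci, h1, h2, hv, PySem.Dict.contains_insert]

theorem pvStepR_sub_stepA (c : PySem.Dict String Int) (s : List String)
    (it : String × List String) (hwf : pvWfIt it)
    (hs : ∀ x ∈ s, c.contains x = true) :
    ∀ x ∈ pvStepR s it, (pvStepA c it).contains x = true := by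
  intro x hx
  rcases pvStepR_cases s it x hx with hxs | ⟨hx1, g1, g2, op, hit, hg1, hg2⟩
  · exact pvStepA_mono c it x (hs x hxs)
  · subst hx1
    have hop : op = "OR" ∨ op = "AND" ∨ op = "XOR" := by
      have := hwf.2; rw [hit] at this; simpa using this
    exact pvStepA_fires c it g1 g2 op hit hop (hs g1 hg1) (hs g2 hg2)

theorem pvStep_sub_sweep (wd : PySem.Dict String (List String))
    (s : List String) (c : PySem.Dict String Int)
    (hwf : ∀ p ∈ wd.items, pvWfIt p)
    (hs : ∀ x ∈ s, c.contains x = true) :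
    ∀ x ∈ pvStep wd s, (pvSweepA wd c).contains x = true := by
  unfold pvStep pvSweepA
  have : ∀ (l : List (String × List String)) (s : List String) (c : PySem.Dict String Int), (∀ p ∈ l, pvWfIt p) → (∀ x ∈ s, c.contains x = true) →
      ∀ x ∈ l.foldl pvStepR s, (l.foldl pvStepA c).contains x = true := by
    intro l
    induction l with
    | nil => intro s c _ hs; exact hs
    | cons p t ih =>
      intro s c hwf hs
      exact ih _ _ (fun q hq => hwf q (List.mem_cons_of_mem _ hq))
        (pvStepR_sub_stepA c s p (hwf p (List.mem_cons_self ..)) hs)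
  exact this wd.items s c hwf hs

theorem pvReach_shift (wd : PySem.Dict String (List String)) (s : List String) (n : Nat) :
    pvReach wd s (n + 1) = pvReach wd (pvStep wd s) n := by
  induction n with
  | zero => rfl
  | succ m ih => show pvStep wd (pvReach wd s (m + 1)) = _; rw [ih]; rfl

theorem pvLoopA_of_all (wd : PySem.Dict String (List String)) (zs : PySem.Set String)
    (fuel : Nat) (c : PySem.Dict String Int)
    (h : zs.all (fun z => c.contains z) = true) : pvLoopA wd zs fuel c = c := by
  cases fuel <;> rw [pvLoopA] <;> simp [h]

theorem pvLoopA_succ_of_not (wd : PySem.Dict String (List String)) (zs : PySem.Set String)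
    (f : Nat) (c : PySem.Dict String Int)
    (h : zs.all (fun z => c.contains z) = false) :
    pvLoopA wd zs (f + 1) c = pvLoopA wd zs f (pvSweepA wd c) := by
  rw [pvLoopA]; simp [h]

theorem pvLoopA_complete (wd : PySem.Dict String (List String)) (zs : PySem.Set String)
    (hwf : ∀ p ∈ wd.items, pvWfIt p) :
    ∀ (n fuel : Nat) (s : List String) (c : PySem.Dict String Int),
      (∀ x ∈ s, c.contains x = true) →
      (∀ z ∈ (zs : List String), z ∈ pvReach wd s n) → n ≤ fuel →
      ∀ z ∈ (zs : List String), (pvLoopA wd zs fuel c).contains z = true := by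
  intro n
  induction n with
  | zero =>
    intro fuel s c hs hz _ z hzz
    have hc : zs.all (fun z => c.contains z) = true := by
      simp only [List.all_eq_true]
      intro z hzm
      exact hs z (hz z hzm)
    rw [pvLoopA_of_all wd zs fuel c hc]
    exact hs z (hz z hzz)
  | succ m ih =>
    intro fuel s c hs hz hnf z hzz
    by_cases hc : zs.all (fun z => c.contains z) = true
    · rw [pvLoopA_of_all wd zs fuel c hc]
      exact (List.all_eq_true.1 hc) z hzz
    · rw [Bool.not_eq_true] at hc
      cases fuel with
      | zero => omega
      | succ f =>
        rw [pvLoopA_succ_of_not wd zs f c hc]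
        refine ih f (pvStep wd s) (pvSweepA wd c)
          (pvStep_sub_sweep wd s c hwf hs) ?_ (by omega) z hzz
        intro z' hz'
        rw [← pvReach_shift]
        exact hz z' hz'

-- ---- B side ----

theorem pvEvB_mono (wd : PySem.Dict String (List String)) :
    ∀ (fuel : Nat) (m : PySem.Dict String Int) (w : String) (x : Int)
      (m' : PySem.Dict String Int), pvEvB wd fuel m w = some (x, m') →
      ∀ k, m.contains k = true → m'.contains k = true := by
  intro fuel
  induction fuel with
  | zero => intro m w x m' h; simp [pvEvB] at h
  | succ f ih =>
    intro m w x m' h k hk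
    rw [pvEvB] at h
    match hm : m.get? w with
    | some v =>
      rw [hm] at h; simp at h; rw [← h.2]; exact hk
    | none =>
      rw [hm] at h
      match hw : wd.get? w with
      | some [g1, g2, op] =>
        rw [hw] at h
        simp only at h
        match h1 : pvEvB wd f m g1 with
        | none => rw [h1] at h; simp at h
        | some (x1, m1) =>
          rw [h1] at h
          dsimp only at h
          match h2 : pvEvB wd f m1 g2 with
          | none => rw [h2] at h; simp at h
          | some (x2, m2) =>
            rw [h2] at h
            dsimp only at h
            simp at h
            rw [← h.2]
            have hk1 := ih m g1 x1 m1 h1 k hk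
            have hk2 := ih m1 g2 x2 m2 h2 k hk1
            rw [PySem.Dict.contains_insert]; simp [hk2]
      | some [] => rw [hw] at h; simp at h
      | some [a] => rw [hw] at h; simp at h
      | some [a, b] => rw [hw] at h; simp at h
      | some (a :: b :: cc :: d :: t) => rw [hw] at h; simp at h
      | none => rw [hw] at h; simp at h

theorem pvEvB_sound (gd : PySem.Dict String Int) (wd : PySem.Dict String (List String)) :
    ∀ (fuel : Nat) (m : PySem.Dict String Int) (w : String) (x : Int)
      (m' : PySem.Dict String Int), pvEvB wd fuel m w = some (x, m') →
      pvInv gd wd m → pvInv gd wd m' ∧ pvEvals gd wd w x := by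
  intro fuel
  induction fuel with
  | zero => intro m w x m' h; simp [pvEvB] at h
  | succ f ih =>
    intro m w x m' h hm
    rw [pvEvB] at h
    match hmg : m.get? w with
    | some v =>
      rw [hmg] at h; simp at h
      rw [← h.2, ← h.1]
      exact ⟨hm, hm.2 w v hmg⟩
    | none =>
      rw [hmg] at h
      match hw : wd.get? w with
      | some [g1, g2, op] =>
        rw [hw] at h
        simp only at h
        match h1 : pvEvB wd f m g1 with
        | none => rw [h1] at h; simp at h
        | some (x1, m1) =>
          rw [h1] at h
          dsimp only at h
          match h2 : pvEvB wd f m1 g2 with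
          | none => rw [h2] at h; simp at h
          | some (x2, m2) =>
            rw [h2] at h
            dsimp only at h
            simp at h
            obtain ⟨hm1, he1⟩ := ih m g1 x1 m1 h1 hm
            obtain ⟨hm2, he2⟩ := ih m1 g2 x2 m2 h2 hm1
            have hgd : gd.contains w = false := by
              cases hgd : gd.contains w
              · rfl
              · have := hm.1 w hgd
                rw [PySem.Dict.contains_eq_isSome_get?, hmg] at this
                simp at this
            have hev : pvEvals gd wd w (pvApplyB op x1 x2) :=
              pvEvals.gate w g1 g2 op x1 x2 hgd hw he1 he2
            rw [← h.1, ← h.2]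
            exact ⟨pvInv_insert gd wd m2 w _ hm2 hev, hev⟩
      | some [] => rw [hw] at h; simp at h
      | some [a] => rw [hw] at h; simp at h
      | some [a, b] => rw [hw] at h; simp at h
      | some (a :: b :: cc :: d :: t) => rw [hw] at h; simp at h
      | none => rw [hw] at h; simp at h

-- ---- B side completeness: the reach list is prefix-closed, DFS follows it ----

-- each appended element is new, is a gate of wd, and its inputs occur earlier
def pvExt (wd : PySem.Dict String (List String)) (s : List String) (t : List String) : Prop :=
  ∀ j (hj : j < t.length), t[j] ∉ s ++ t.take j ∧
    ∃ g1 g2 op, (t[j], [g1, g2, op]) ∈ wd.items ∧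
      g1 ∈ s ++ t.take j ∧ g2 ∈ s ++ t.take j

theorem pvStepR_ext (s : List String) (it : String × List String) :
    pvStepR s it = s ∨
    (pvStepR s it = s ++ [it.1] ∧ it.1 ∉ s ∧
      ∃ g1 g2 op, it.2 = [g1, g2, op] ∧ g1 ∈ s ∧ g2 ∈ s) := by
  unfold pvStepR
  match hit : it.2 with
  | [] => exact Or.inl rfl
  | [a] => exact Or.inl rfl
  | [a, b] => exact Or.inl rfl
  | a :: b :: cc :: d :: t => exact Or.inl rfl
  | [g1, g2, op] =>
    by_cases hc : g1 ∈ s ∧ g2 ∈ s ∧ it.1 ∉ s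
    · exact Or.inr ⟨by simp [hc], hc.2.2, g1, g2, op, rfl, hc.1, hc.2.1⟩
    · exact Or.inl (by simp [hc])

theorem pvExt_snoc (wd : PySem.Dict String (List String)) (s t : List String) (x : String)
    (g1 g2 op : String) (h : pvExt wd s t) (hx : x ∉ s ++ t)
    (hin : (x, [g1, g2, op]) ∈ wd.items) (h1 : g1 ∈ s ++ t) (h2 : g2 ∈ s ++ t) :
    pvExt wd s (t ++ [x]) := by
  intro j hj
  simp only [List.length_append, List.length_cons, List.length_nil] at hj
  by_cases hjt : j < t.length
  · have e1 : (t ++ [x])[j] = t[j] := List.getElem_append_left hjt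
    have e2 : (t ++ [x]).take j = t.take j := List.take_append_of_le_length (by omega)
    rw [e1, e2]
    exact h j hjt
  · have hje : j = t.length := by omega
    subst hje
    have e1 : (t ++ [x])[t.length] = x := by
      rw [List.getElem_append_right (le_refl _)]
      simp
    have e2 : (t ++ [x]).take t.length = t := List.take_left ..
    rw [e1, e2]
    exact ⟨hx, g1, g2, op, hin, h1, h2⟩

theorem pvStep_ext (wd : PySem.Dict String (List String)) :
    ∀ (l : List (String × List String)) (s0 s : List String) (t : List String),
      (∀ p ∈ l, p ∈ wd.items) → s = s0 ++ t → pvExt wd s0 t →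
      ∃ t', l.foldl pvStepR s = s0 ++ t' ∧ pvExt wd s0 t' := by
  intro l
  induction l with
  | nil => intro s0 s t hl hs h; exact ⟨t, by simpa using hs, h⟩
  | cons p l ih =>
    intro s0 s t hl hs h
    rcases pvStepR_ext s p with he | ⟨he, hnew, g1, g2, op, hsh, h1, h2⟩
    · exact ih s0 (pvStepR s p) t (fun q hq => hl q (List.mem_cons_of_mem _ hq))
        (by rw [he, hs]) h
    · refine ih s0 (pvStepR s p) (t ++ [p.1])
        (fun q hq => hl q (List.mem_cons_of_mem _ hq))
        (by rw [he, hs, List.append_assoc]) ?_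
      subst hs
      have hin : (p.1, [g1, g2, op]) ∈ wd.items := by
        have := hl p (List.mem_cons_self ..)
        have hp : p = (p.1, [g1, g2, op]) := by
          cases p; simp at hsh ⊢; exact hsh
        rw [← hp]; exact this
      exact pvExt_snoc wd s0 t p.1 g1 g2 op h hnew hin h1 h2

theorem pvReach_ext (wd : PySem.Dict String (List String)) (s0 : List String) (n : Nat) :
    ∃ t, pvReach wd s0 n = s0 ++ t ∧ pvExt wd s0 t := by
  induction n with
  | zero => exact ⟨[], by simp [pvReach], fun j hj => absurd hj (by simp)⟩
  | succ m ih =>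
    obtain ⟨t, ht, hext⟩ := ih
    show ∃ t', pvStep wd (pvReach wd s0 m) = s0 ++ t' ∧ pvExt wd s0 t'
    unfold pvStep
    exact pvStep_ext wd wd.items s0 (pvReach wd s0 m) t (fun p hp => hp) ht hext

-- the extension consists of distinct wd-keys, so it is at most wires.length long
theorem pvExt_nodup (wd : PySem.Dict String (List String)) (s0 t : List String)
    (h : pvExt wd s0 t) : t.Nodup := by
  rw [List.Nodup, List.pairwise_iff_getElem]
  intro i j hi hj hij
  intro he
  have := (h j hj).1
  apply this
  rw [← he]
  refine List.mem_append.2 (Or.inr ?_)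
  rw [List.mem_iff_getElem]
  exact ⟨i, by simp [List.length_take]; omega, List.getElem_take⟩

theorem pvExt_subset_keys (wd : PySem.Dict String (List String)) (s0 t : List String)
    (h : pvExt wd s0 t) : ∀ x ∈ t, x ∈ wd.keys := by
  intro x hx
  obtain ⟨j, hj, rfl⟩ := List.mem_iff_getElem.1 hx
  obtain ⟨_, g1, g2, op, hin, _, _⟩ := h j hj
  exact PySem.Dict.mem_keys_of_mem_items wd hin

theorem pvOfList_size_le (wires : List (String × List String)) :
    (PySem.Dict.ofList wires).keys.length ≤ wires.length := by
  have step : ∀ (l : List (String × List String)) (d : PySem.Dict String (List String)),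
      (l.foldl (fun acc p => acc.insert p.1 p.2) d).items.length ≤ d.items.length + l.length := by
    intro l
    induction l with
    | nil => intro d; simp
    | cons p l ih =>
      intro d
      refine le_trans (ih (d.insert p.1 p.2)) ?_
      rw [PySem.Dict.items_insert]
      split_ifs <;> simp <;> omega
  have h := step wires PySem.Dict.empty
  simp only [PySem.Dict.keys, List.length_map]
  simpa [PySem.Dict.ofList, PySem.Dict.update, PySem.Dict.empty] using h

theorem pvExt_length_le (wd : PySem.Dict String (List String)) (s0 t : List String)
    (h : pvExt wd s0 t) : t.length ≤ wd.keys.length :=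
  (List.subperm_of_subset (pvExt_nodup wd s0 t h) (pvExt_subset_keys wd s0 t h)).length_le

-- a wire already in the memo evaluates immediately
theorem pvEvB_of_contains (wd : PySem.Dict String (List String)) (fuel : Nat)
    (m : PySem.Dict String Int) (w : String) (hc : m.contains w = true) (hf : 1 ≤ fuel) :
    ∃ x m', pvEvB wd fuel m w = some (x, m') := by
  obtain ⟨f, rfl⟩ : ∃ f, fuel = f + 1 := ⟨fuel - 1, by omega⟩
  rw [pvEvB]
  rw [PySem.Dict.contains_eq_isSome_get?] at hc
  match hm : m.get? w with
  | some v => exact ⟨v, m, rfl⟩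
  | none => rw [hm] at hc; simp at hc

theorem pvEvB_complete (gd : PySem.Dict String Int) (wd : PySem.Dict String (List String))
    (hnd : wd.keys.Nodup) (t : List String) (hext : pvExt wd gd.keys t) :
    ∀ (j fuel : Nat) (m : PySem.Dict String Int),
      (∀ k, gd.contains k = true → m.contains k = true) →
      ∀ (hj : j < t.length), j + 2 ≤ fuel →
      ∃ x m', pvEvB wd fuel m t[j] = some (x, m') := by
  intro j
  induction j using Nat.strong_induction_on with
  | _ j ih =>
    intro fuel m hk hj hf
    obtain ⟨f, rfl⟩ : ∃ f, fuel = f + 1 := ⟨fuel - 1, by omega⟩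
    by_cases hmc : m.contains t[j] = true
    · exact pvEvB_of_contains wd (f + 1) m t[j] hmc (by omega)
    · obtain ⟨_, g1, g2, op, hin, hg1, hg2⟩ := hext j hj
      have hw : wd.get? t[j] = some [g1, g2, op] := PySem.Dict.get?_of_mem_items wd hin hnd
      have hm : m.get? t[j] = none :=
        (PySem.Dict.get?_eq_none_iff_contains m t[j]).2 (by simpa using hmc)
      have hch : ∀ (g : String) (m : PySem.Dict String Int), g ∈ gd.keys ++ t.take j →
          (∀ k, gd.contains k = true → m.contains k = true) →
          ∃ x m', pvEvB wd f m g = some (x, m') := by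
        intro g m hg hkm
        rcases List.mem_append.1 hg with hbase | htake
        · exact pvEvB_of_contains wd f m g
            (hkm g ((PySem.Dict.contains_iff_mem_keys gd g).2 hbase)) (by omega)
        · obtain ⟨i, hi, hig⟩ := List.mem_iff_getElem.1 htake
          have hilt : i < j := by have := hi; simp [List.length_take] at this; omega
          have hit : i < t.length := by simp [List.length_take] at hi; omega
          have : t[i] = g := by rw [← hig]; exact (List.getElem_take).symm
          rw [← this]
          exact ih i hilt f m hkm hit (by omega)
      obtain ⟨x1, m1, h1⟩ := hch g1 m hg1 hk
      have hk1 : ∀ k, gd.contains k = true → m1.contains k = true :=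
        fun k hk' => pvEvB_mono wd f m g1 x1 m1 h1 k (hk k hk')
      obtain ⟨x2, m2, h2⟩ := hch g2 m1 hg2 hk1
      rw [pvEvB, hm, hw]
      dsimp only
      rw [h1]
      dsimp only
      rw [h2]
      exact ⟨_, _, rfl⟩

-- ---- the two result folds agree ----

theorem pvFold_eq (gd : PySem.Dict String Int) (wd : PySem.Dict String (List String))
    (hnd : wd.keys.Nodup) (cF : PySem.Dict String Int) (hInvF : pvInv gd wd cF)
    (t : List String) (hext : pvExt wd gd.keys t) (fuel : Nat) (hft : t.length + 1 ≤ fuel) :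
    ∀ (L : List String) (r : Int) (m : PySem.Dict String Int), pvInv gd wd m →
      (∀ z ∈ L, cF.contains z = true ∧ z ∈ gd.keys ++ t) →
      L.foldl (fun r z => PySem.Int.bor (r <<< (1 : Nat)) (cF.getD z 0)) r
        = (L.foldl (fun (p : Int × PySem.Dict String Int) z =>
            match pvEvB wd fuel p.2 z with
            | some (v, m') => (PySem.Int.bor (p.1 <<< (1 : Nat)) v, m')
            | none => p) (r, m)).1 := by
  intro L
  induction L with
  | nil => intro r m _ _; rfl
  | cons z L ihL =>
    intro r m hm hL
    have hz := hL z (List.mem_cons_self ..)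
    have hev : ∃ x m', pvEvB wd fuel m z = some (x, m') := by
      rcases List.mem_append.1 hz.2 with hb | ht
      · exact pvEvB_of_contains wd fuel m z
          (hm.1 z ((PySem.Dict.contains_iff_mem_keys gd z).2 hb)) (by omega)
      · obtain ⟨i, hi, rfl⟩ := List.mem_iff_getElem.1 ht
        exact pvEvB_complete gd wd hnd t hext i fuel m hm.1 hi (by omega)
    obtain ⟨x, m', hev⟩ := hev
    obtain ⟨hm', hx⟩ := pvEvB_sound gd wd fuel m z x m' hev hm
    have hval : cF.getD z 0 = x :=
      pvEvals_det gd wd z _ _ (hInvF.2 z _ (pvContains_getD cF z hz.1)) hx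
    simp only [List.foldl_cons]
    rw [hev]
    dsimp only
    rw [hval]
    exact ihL (PySem.Int.bor (r <<< (1 : Nat)) x) m' hm'
      (fun z' hz' => hL z' (List.mem_cons_of_mem _ hz'))

-- ===== VERDICT (by name: the statement is the Claim_ definition above) =====
theorem solution_spec : Claim_equal_solution := by
  intro gates wires _ hpre
  unfold Spec_solution solution solution_alt
  dsimp only
  have hnd : (PySem.Dict.ofList wires).keys.Nodup := PySem.Dict.nodup_keys_ofList wires
  have hznd : ((PySem.Dict.ofList wires).keys.filter
      (fun k => PySem.Str.startswith k "z")).Nodup := hnd.filter _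
  rw [PySem.Set.ofList_eq_self_of_nodup _ hznd]
  have hInv0 : pvInv (PySem.Dict.ofList gates) (PySem.Dict.ofList wires)
      (PySem.Dict.ofList gates) := pvInv_init _ _
  rcases hpre with hpre | hpre
  · -- all z-wires already among the gates: the while loop exits at once
    have hall : (((PySem.Dict.ofList wires).keys.filter
        (fun k => PySem.Str.startswith k "z")) : PySem.Set String).all
        (fun z => (PySem.Dict.ofList gates).contains z) = true := by
      simp only [List.all_eq_true]
      intro z hz
      exact (PySem.Dict.contains_iff_mem_keys _ z).2 (hpre z hz)
    rw [pvLoopA_of_all _ _ _ _ hall]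
    refine pvFold_eq (PySem.Dict.ofList gates) (PySem.Dict.ofList wires) hnd _ hInv0
      [] (fun j hj => absurd hj (by simp)) (wires.length + 1) (by simp)
      _ 0 (PySem.Dict.ofList gates) hInv0 ?_
    intro z hz
    have hzmem := (PySem.List.mem_sorted _ _ _ z).1 hz
    exact ⟨(PySem.Dict.contains_iff_mem_keys _ z).2 (hpre z hzmem),
      by simpa using hpre z hzmem⟩
  · -- general case: the circuit derives every z-wire
    have hwf : ∀ p ∈ (PySem.Dict.ofList wires).items, pvWfIt p := fun p hp => hpre.1 p hp
    obtain ⟨t, hreach, hext⟩ :=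
      pvReach_ext (PySem.Dict.ofList wires) (PySem.Dict.ofList gates).keys wires.length
    have htlen : t.length + 1 ≤ wires.length + 1 := by
      have h1 := pvExt_length_le _ _ _ hext
      have h2 := pvOfList_size_le wires
      omega
    have hInvF := pvLoopA_inv (PySem.Dict.ofList gates) (PySem.Dict.ofList wires)
      ((PySem.Dict.ofList wires).keys.filter (fun k => PySem.Str.startswith k "z")) hnd
      (wires.length + 1) (PySem.Dict.ofList gates) hInv0
    have hzc : ∀ z ∈ ((PySem.Dict.ofList wires).keys.filter
        (fun k => PySem.Str.startswith k "z")),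
        (pvLoopA (PySem.Dict.ofList wires)
          ((PySem.Dict.ofList wires).keys.filter (fun k => PySem.Str.startswith k "z"))
          (wires.length + 1) (PySem.Dict.ofList gates)).contains z = true :=
      pvLoopA_complete (PySem.Dict.ofList wires)
        ((PySem.Dict.ofList wires).keys.filter (fun k => PySem.Str.startswith k "z"))
        hwf wires.length (wires.length + 1)
        (PySem.Dict.ofList gates).keys (PySem.Dict.ofList gates)
        (fun x hx => (PySem.Dict.contains_iff_mem_keys _ x).2 hx)
        hpre.2 (by omega)
    refine pvFold_eq (PySem.Dict.ofList gates) (PySem.Dict.ofList wires) hnd _ hInvF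
      t hext (wires.length + 1) htlen _ 0 (PySem.Dict.ofList gates) hInv0 ?_
    intro z hz
    have hzmem := (PySem.List.mem_sorted _ _ _ z).1 hz
    refine ⟨hzc z hzmem, ?_⟩
    have := hpre.2 z hzmem
    rw [hreach] at this
    exact this
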